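-- pv_equiv track=rewrite | github.com/KerenC91/deep-bispectrum-inversion | inference.py | match_inidices_to_baseline
-- ===== SOURCE A (Python) =====
-- def match_inidices_to_baseline(ot_matches, bt_matches):
--     '''
--     Parameters
--     ----------
--     ot_matches : list of length K, containing (i, j) match indices for target and output respectively
--     bt_matches : list of length K, containing (i, j) match indices for target and baseline respectively
--         DESCRIPTION.
--
--     Returns a unified list of matches, each containing a tuple of indices (target, pred, baseline)
--     -------
--     None.
--
--     '''
--     matches = []
--     K = len(ot_matches)
--     used_ks = set()
--
--     for k1 in range(K): #looping over ot_matches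
--         for k2 in range(K): #looping over bt_matches
--             if k2 in used_ks:
--                 continue
--             if ot_matches[k1][0] == bt_matches[k2][0]: #looking for a match in target index
--                 matches.append((ot_matches[k1][0], ot_matches[k1][1], bt_matches[k2][1]))
--                 used_ks.add(k2)
--                 break
--
--     return matches  # list of length K of (i, j, l) tuples
-- ===== SOURCE B (Python) =====
-- def match_inidices_to_baseline(ot_matches, bt_matches):
--     # Index the (first K) baseline matches by target value into ordered queues,
--     # then consume each queue front-to-back: O(K) instead of A's O(K^2).
--     K = len(ot_matches)
--     queues = {}
--     for k2 in range(K):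
--         r = bt_matches[k2]
--         queues.setdefault(r[0], []).append(r[1])
--     matches = []
--     pos = {}
--     for m in ot_matches:
--         t = m[0]
--         q = queues.get(t, [])
--         i = pos.get(t, 0)
--         if i < len(q):
--             matches.append((t, m[1], q[i]))
--             pos[t] = i + 1
--     return matches
-- ===== Notes on version B (the rewrite author's own statement) =====
-- stated objective: faster
-- what changed: Replaces A's nested rescans of bt_matches with a single pass that buckets the first K baseline matches by target value into ordered queues and then consumes each queue front-to-back with a per-target position counter, removing the inner scan.
-- outside the precondition, e.g. on match_inidices_to_baseline([(1, 2), (3, 4)], [(1, 5), (9,)]): A returns [(1, 2, 5)], B raises IndexError; on match_inidices_to_baseline([(1,)], [(2, 3)]): A returns [], B returns []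
import Mathlib
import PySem

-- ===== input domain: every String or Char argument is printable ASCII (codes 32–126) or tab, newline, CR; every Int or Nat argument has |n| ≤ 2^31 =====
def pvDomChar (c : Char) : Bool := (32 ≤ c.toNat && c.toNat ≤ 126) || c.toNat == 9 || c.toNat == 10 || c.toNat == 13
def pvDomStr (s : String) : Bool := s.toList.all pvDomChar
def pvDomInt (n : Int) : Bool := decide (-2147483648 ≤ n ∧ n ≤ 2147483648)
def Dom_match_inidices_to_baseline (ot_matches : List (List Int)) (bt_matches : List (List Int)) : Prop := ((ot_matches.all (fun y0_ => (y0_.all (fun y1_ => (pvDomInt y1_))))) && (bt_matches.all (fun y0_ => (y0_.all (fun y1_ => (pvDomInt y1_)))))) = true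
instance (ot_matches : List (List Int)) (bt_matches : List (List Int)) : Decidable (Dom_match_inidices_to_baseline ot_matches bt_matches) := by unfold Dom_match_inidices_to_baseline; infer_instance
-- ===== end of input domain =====

-- B replaces A's quadratic nested rescans by bucketing the first K baseline matches into
-- per-target queues consumed front-to-back (asymptotically faster; return value proved equal on Pre_).


-- shared accessors: r[0] and r[1] (total forms; in range under Pre_)
def pvFst0 (r : List Int) : Int := PySem.List.pyGetD r 0 0
def pvSnd1 (r : List Int) : Int := PySem.List.pyGetD r 1 0

-- ===== PORT A =====
-- inner 'for k2 in range(K)' loop with continue/break, threading (matches, used_ks)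
def pvInnerA (bt : List (List Int)) (row : List Int) :
    List Int → List (List Int) × PySem.Set Int → List (List Int) × PySem.Set Int
  | [], st => st
  | k2 :: rest, (ms, used) =>
    if PySem.Set.contains used k2 then pvInnerA bt row rest (ms, used)
    else if pvFst0 (PySem.List.pyGetD bt k2 []) = pvFst0 row then
      (ms ++ [[pvFst0 row, pvSnd1 row, pvSnd1 (PySem.List.pyGetD bt k2 [])]],
       PySem.Set.add used k2)
    else pvInnerA bt row rest (ms, used)

def match_inidices_to_baseline (ot_matches : List (List Int)) (bt_matches : List (List Int)) : List (List Int) :=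
  (ot_matches.foldl
    (fun st row => pvInnerA bt_matches row (PySem.List.pyRange 0 (ot_matches.length : Int) 1) st)
    ([], PySem.Set.empty)).1

-- ===== PORT B =====
-- pass 1: queues.setdefault(bt[k2][0], []).append(bt[k2][1]) for k2 in range(K)
def pvQueuesB (bt : List (List Int)) (K : Nat) : PySem.Dict Int (List Int) :=
  (PySem.List.pyRange 0 (K : Int) 1).foldl
    (fun d k2 =>
      d.modify (pvFst0 (PySem.List.pyGetD bt k2 [])) []
        (· ++ [pvSnd1 (PySem.List.pyGetD bt k2 [])]))
    PySem.Dict.empty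

-- pass 2 body: pop the first unused queue entry for this ot row, if any
def pvStepB (queues : PySem.Dict Int (List Int))
    (st : List (List Int) × PySem.Dict Int Int) (m : List Int) :
    List (List Int) × PySem.Dict Int Int :=
  let t := pvFst0 m
  let q := queues.getD t []
  let i := st.2.getD t 0
  if i < (q.length : Int) then
    (st.1 ++ [[t, pvSnd1 m, PySem.List.pyGetD q i 0]], st.2.insert t (i + 1))
  else st

def match_inidices_to_baseline_alt (ot_matches : List (List Int)) (bt_matches : List (List Int)) : List (List Int) :=
  (ot_matches.foldl (pvStepB (pvQueuesB bt_matches ot_matches.length))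
    ([], PySem.Dict.empty)).1

-- ===== PRECONDITION & SPEC =====
-- Pre_ excludes the inputs where A (or B) raises IndexError — a row shorter than 2 that the loops
-- read, or bt_matches shorter than ot_matches; it is slightly wider than the exact raising set
-- (A's lazy scan can return even when a later bt row is short), a narrowing stated in the claim's cites.
def Pre_match_inidices_to_baseline (ot_matches : List (List Int)) (bt_matches : List (List Int)) : Prop :=
  ot_matches.length ≤ bt_matches.length ∧
  (∀ r ∈ ot_matches, 2 ≤ r.length) ∧
  (∀ r ∈ bt_matches.take ot_matches.length, 2 ≤ r.length)
instance (ot_matches : List (List Int)) (bt_matches : List (List Int)) : Decidable (Pre_match_inidices_to_baseline ot_matches bt_matches) := by unfold Pre_match_inidices_to_baseline; infer_instance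

def pvWitness_match_inidices_to_baseline : List (List Int) × List (List Int) :=
  ([[1, 2], [2, 5]], [[2, 7], [1, 9]])

def Spec_match_inidices_to_baseline (ot_matches : List (List Int)) (bt_matches : List (List Int)) (out : List (List Int)) : Prop := out = match_inidices_to_baseline_alt ot_matches bt_matches
instance (ot_matches : List (List Int)) (bt_matches : List (List Int)) (out : List (List Int)) : Decidable (Spec_match_inidices_to_baseline ot_matches bt_matches out) := by unfold Spec_match_inidices_to_baseline; infer_instance

-- ===== CLAIM (what is proved, stated in full; the proofs are below) =====
def Claim_equal_match_inidices_to_baseline : Prop := ∀ (ot_matches : List (List Int)) (bt_matches : List (List Int)), Dom_match_inidices_to_baseline ot_matches bt_matches → Pre_match_inidices_to_baseline ot_matches bt_matches → Spec_match_inidices_to_baseline ot_matches bt_matches (match_inidices_to_baseline ot_matches bt_matches)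

-- ===== LEMMAS AND PROOFS =====

-- proof-side views of port A's data
def pvTg (bt : List (List Int)) (k : Int) : Int := pvFst0 (PySem.List.pyGetD bt k [])
def pvVl (bt : List (List Int)) (k : Int) : Int := pvSnd1 (PySem.List.pyGetD bt k [])
def pvOcc (bt : List (List Int)) (ks : List Int) (t : Int) : List Int :=
  ks.filter (fun k => pvTg bt k == t)

-- simulation invariant: used holds exactly the indices of the first pos[t] occurrences of each target t
def pvInv (bt : List (List Int)) (ks : List Int) (used : PySem.Set Int) (pos : PySem.Dict Int Int) : Prop :=
  (∀ t, 0 ≤ pos.getD t 0) ∧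
  (∀ k : Int, k ∈ used ↔ k ∈ ks ∧ (pvOcc bt ks (pvTg bt k)).idxOf k < (pos.getD (pvTg bt k) 0).toNat)

lemma pvInnerA_eq (bt : List (List Int)) (row : List Int) (ks : List Int)
    (ms : List (List Int)) (used : PySem.Set Int) :
    pvInnerA bt row ks (ms, used) =
      match ks.find? (fun k => !(PySem.Set.contains used k) && (pvTg bt k == pvFst0 row)) with
      | none => (ms, used)
      | some k => (ms ++ [[pvFst0 row, pvSnd1 row, pvVl bt k]], PySem.Set.add used k) := by
  induction ks with
  | nil => simp [pvInnerA]
  | cons k2 rest ih =>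
      rw [pvInnerA, List.find?_cons]
      by_cases hc : k2 ∈ used
      · rw [if_pos (by simpa [PySem.Set.contains_iff] using hc),
            show (!PySem.Set.contains used k2 && (pvTg bt k2 == pvFst0 row)) = false from by
              simp [hc]]
        exact ih
      · have hcf : PySem.Set.contains used k2 = false := by
          simpa [PySem.Set.contains_iff] using hc
        rw [if_neg (by simp [hc])]
        by_cases he : pvTg bt k2 = pvFst0 row
        · rw [show (!PySem.Set.contains used k2 && (pvTg bt k2 == pvFst0 row)) = true from by
              simp [hc, he]]
          simp only [pvTg] at he
          rw [if_pos he]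
          simp [pvVl]
        · rw [show (!PySem.Set.contains used k2 && (pvTg bt k2 == pvFst0 row)) = false from by
              simp [he]]
          rw [if_neg (by simpa [pvTg] using he)]
          simpa using ih

lemma pvFindFirst (l : List Int) (P : Int → Bool) (u : Int → Bool) (n : Nat)
    (hnd : (l.filter P).Nodup)
    (hu : ∀ k ∈ l.filter P, u k = decide ((l.filter P).idxOf k < n)) :
    l.find? (fun k => !u k && P k) = (l.filter P)[n]? := by
  induction l generalizing n with
  | nil => simp
  | cons a rest ih =>
      by_cases hP : P a
      · rw [List.filter_cons_of_pos hP] at hnd hu ⊢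
        have ha : u a = decide (0 < n) := by
          have := hu a (List.mem_cons_self)
          simpa using this
        cases n with
        | zero =>
            have : u a = false := by simpa using ha
            rw [List.find?_cons]
            simp [this, hP]
        | succ m =>
            have hua : u a = true := by simpa using ha
            rw [List.find?_cons]
            simp only [hua, hP, Bool.not_true, Bool.false_and]
            have hnotin : a ∉ rest.filter P := by
              simpa using (List.nodup_cons.mp hnd).1
            have := ih m (List.nodup_cons.mp hnd).2 ?_
            · simpa using this
            · intro k hk
              have hne : k ≠ a := fun h => hnotin (h ▸ hk)
              have := hu k (List.mem_cons_of_mem _ hk)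
              rw [this]
              have : (a :: rest.filter P).idxOf k = (rest.filter P).idxOf k + 1 := by
                simp [Ne.symm hne]
              simp [this]
      · rw [List.filter_cons_of_neg hP] at hnd hu ⊢
        rw [List.find?_cons]
        simp only [hP, Bool.and_false]
        exact ih n hnd hu

lemma pvQueues_getD (bt : List (List Int)) (K : Nat) (t : Int) :
    (pvQueuesB bt K).getD t [] =
      (pvOcc bt (PySem.List.pyRange 0 (K : Int) 1) t).map (pvVl bt) := by
  unfold pvQueuesB pvOcc
  have h1 : ∀ (l : List Int) (d : PySem.Dict Int (List Int)),
      l.foldl (fun d k2 =>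
          d.modify (pvFst0 (PySem.List.pyGetD bt k2 [])) []
            (· ++ [pvSnd1 (PySem.List.pyGetD bt k2 [])])) d
        = (l.map (fun k => (pvTg bt k, pvVl bt k))).foldl
            (fun d p => d.modify p.1 [] (· ++ [p.2])) d := by
    intro l
    induction l with
    | nil => intro d; rfl
    | cons a r ih => intro d; simp only [List.foldl_cons, List.map_cons]; exact ih _
  rw [h1, PySem.Dict.getD_foldl_modify_append]
  simp [List.filter_map, Function.comp_def, List.map_map, pvTg]

lemma pvSim (bt : List (List Int)) (ks : List Int) (hnd : ks.Nodup)
    (queues : PySem.Dict Int (List Int))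
    (hq : ∀ t, queues.getD t [] = (pvOcc bt ks t).map (pvVl bt))
    (row : List Int) (ms : List (List Int)) (used : PySem.Set Int) (pos : PySem.Dict Int Int)
    (h : pvInv bt ks used pos) :
    (pvInnerA bt row ks (ms, used)).1 = (pvStepB queues (ms, pos) row).1 ∧
    pvInv bt ks (pvInnerA bt row ks (ms, used)).2 (pvStepB queues (ms, pos) row).2 := by
  obtain ⟨hpos, hmem⟩ := h
  have hocc_nd : (pvOcc bt ks (pvFst0 row)).Nodup := hnd.filter _
  have hfind : ks.find? (fun k => !(PySem.Set.contains used k) && (pvTg bt k == pvFst0 row))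
      = (pvOcc bt ks (pvFst0 row))[(pos.getD (pvFst0 row) 0).toNat]? := by
    apply pvFindFirst _ _ _ _ hocc_nd
    intro k hk
    have hkks : k ∈ ks := List.mem_of_mem_filter hk
    have htk : pvTg bt k = pvFst0 row := by simpa using List.of_mem_filter hk
    by_cases hk' : k ∈ used
    · have h2 := (hmem k).mp hk'
      rw [htk] at h2
      have h3 := h2.2
      simp only [pvOcc] at h3
      simp [hk']
      omega
    · have h2 : ¬ (pvOcc bt ks (pvTg bt k)).idxOf k < (pos.getD (pvTg bt k) 0).toNat :=
        fun hlt => hk' ((hmem k).mpr ⟨hkks, hlt⟩)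
      rw [htk] at h2
      simp only [pvOcc] at h2
      simp [hk']
      omega
  rw [pvInnerA_eq, hfind]
  have hqlen : (queues.getD (pvFst0 row) []).length = (pvOcc bt ks (pvFst0 row)).length := by
    rw [hq]; simp
  cases hget : (pvOcc bt ks (pvFst0 row))[(pos.getD (pvFst0 row) 0).toNat]? with
  | none =>
      have hge : (pvOcc bt ks (pvFst0 row)).length ≤ (pos.getD (pvFst0 row) 0).toNat := by
        simpa using List.getElem?_eq_none_iff.mp hget
      have hn0 : 0 ≤ pos.getD (pvFst0 row) 0 := hpos _
      have hguard : ¬ (pos.getD (pvFst0 row) 0 < ((queues.getD (pvFst0 row) []).length : Int)) := by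
        rw [hqlen]; omega
      constructor
      · simp [pvStepB, hguard]
      · simp only [pvStepB]
        rw [if_neg hguard]
        exact ⟨hpos, hmem⟩
  | some k0 =>
      obtain ⟨hlen, hk0⟩ := List.getElem?_eq_some_iff.mp hget
      have hn0 : 0 ≤ pos.getD (pvFst0 row) 0 := hpos _
      have hguard : pos.getD (pvFst0 row) 0 < ((queues.getD (pvFst0 row) []).length : Int) := by
        rw [hqlen]; omega
      have hk0occ : k0 ∈ pvOcc bt ks (pvFst0 row) := hk0 ▸ List.getElem_mem hlen
      have htk0 : pvTg bt k0 = pvFst0 row := by simpa using List.of_mem_filter hk0occ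
      have hk0ks : k0 ∈ ks := List.mem_of_mem_filter hk0occ
      have hidx0 : (pvOcc bt ks (pvFst0 row)).idxOf k0 = (pos.getD (pvFst0 row) 0).toNat := by
        rw [← hk0]; exact hocc_nd.idxOf_getElem _ hlen
      have hval : PySem.List.pyGetD (queues.getD (pvFst0 row) []) (pos.getD (pvFst0 row) 0) 0
          = pvVl bt k0 := by
        rw [hq]
        rw [PySem.List.pyGetD_eq_getElem (List.map (pvVl bt) (pvOcc bt ks (pvFst0 row))) _ hn0
          (by simp only [List.length_map]; rw [← hqlen]; exact hguard)]
        simp only [List.getElem_map]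
        rw [hk0]
      constructor
      · simp [pvStepB, hguard, hval]
      · simp only [pvStepB]
        rw [if_pos hguard]
        refine ⟨?_, ?_⟩
        · intro t'
          rw [PySem.Dict.getD_insert]
          split_ifs with h'
          · omega
          · exact hpos t'
        · intro k
          rw [PySem.Set.mem_add, PySem.Dict.getD_insert]
          by_cases htk' : pvTg bt k = pvFst0 row
          · rw [htk', if_pos rfl]
            constructor
            · rintro (hku | rfl)
              · obtain ⟨h1, h2⟩ := (hmem k).mp hku
                rw [htk'] at h2
                exact ⟨h1, by omega⟩
              · exact ⟨hk0ks, by omega⟩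
            · rintro ⟨hks, hlt⟩
              have hkocc : k ∈ pvOcc bt ks (pvFst0 row) := by
                simp [pvOcc, htk', hks]
              by_cases hcase : (pvOcc bt ks (pvFst0 row)).idxOf k < (pos.getD (pvFst0 row) 0).toNat
              · exact Or.inl ((hmem k).mpr ⟨hks, by rw [htk']; exact hcase⟩)
              · have heq : (pvOcc bt ks (pvFst0 row)).idxOf k = (pos.getD (pvFst0 row) 0).toNat := by
                  omega
                right
                have hg1 : (pvOcc bt ks (pvFst0 row))[(pvOcc bt ks (pvFst0 row)).idxOf k]? = some k := by
                  rw [List.getElem?_eq_getElem (by omega)]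
                  exact congrArg some (List.getElem_idxOf (by omega))
                have hg2 : (pvOcc bt ks (pvFst0 row))[(pvOcc bt ks (pvFst0 row)).idxOf k]? = some k0 := by
                  rw [heq]; exact hget
                exact Option.some.inj (hg1.symm.trans hg2)
          · rw [if_neg htk']
            constructor
            · rintro (hku | rfl)
              · exact (hmem k).mp hku
              · exact absurd htk0 htk'
            · exact fun hx => Or.inl ((hmem k).mpr hx)

lemma pvFold (bt : List (List Int)) (ks : List Int) (hnd : ks.Nodup)
    (queues : PySem.Dict Int (List Int))
    (hq : ∀ t, queues.getD t [] = (pvOcc bt ks t).map (pvVl bt))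
    (rows : List (List Int)) (ms : List (List Int)) (used : PySem.Set Int) (pos : PySem.Dict Int Int)
    (h : pvInv bt ks used pos) :
    (rows.foldl (fun st row => pvInnerA bt row ks st) (ms, used)).1
      = (rows.foldl (pvStepB queues) (ms, pos)).1 := by
  induction rows generalizing ms used pos with
  | nil => rfl
  | cons row rest ih =>
      obtain ⟨h1, h2⟩ := pvSim bt ks hnd queues hq row ms used pos h
      simp only [List.foldl_cons]
      rw [show pvInnerA bt row ks (ms, used)
            = ((pvStepB queues (ms, pos) row).1, (pvInnerA bt row ks (ms, used)).2) from
          Prod.ext h1 rfl,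
        show pvStepB queues (ms, pos) row
            = ((pvStepB queues (ms, pos) row).1, (pvStepB queues (ms, pos) row).2) from rfl]
      exact ih _ _ _ h2

-- ===== VERDICT (by name: the statement is the Claim_ definition above) =====
theorem match_inidices_to_baseline_spec : Claim_equal_match_inidices_to_baseline := by
  intro ot bt _ _
  unfold Spec_match_inidices_to_baseline match_inidices_to_baseline match_inidices_to_baseline_alt
  exact pvFold bt _ (PySem.List.nodup_pyRange_one 0 _) _ (pvQueues_getD bt ot.length) ot [] [] PySem.Dict.empty
    ⟨fun t => by simp [PySem.Dict.getD_empty], fun k => by simp⟩
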